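-- pv_equiv track=rewrite | github.com/elequaranta/MS-GSP-Algorithm | main.py | same_transaction
-- ===== SOURCE A (Python) =====
-- import copy
--
-- def get_length(sequence):
--     length = 0
--     for t in sequence:
--         length = length + len(t)
--     return length
--
-- def same_transaction(t, T):
--     temp = copy.deepcopy(T)
--     try:
--         for el in t:
--             temp.remove(el)
--         return get_length(temp)
--     except ValueError:
--         return -1
-- ===== SOURCE B (Python) =====
-- def same_transaction(t, T):
--     needed = list(t)
--     total = 0
--     for x in T:
--         if x in needed:
--             needed.remove(x)
--         else:
--             total += len(x)
--     return total if not needed else -1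
-- ===== Notes on version B (the rewrite author's own statement) =====
-- stated objective: simpler
-- what changed: Single pass over T consuming a 'needed' copy of t and summing surviving lengths on the fly, instead of deepcopying T, removing t's elements under try/except, and a separate summing pass.
import Mathlib
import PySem

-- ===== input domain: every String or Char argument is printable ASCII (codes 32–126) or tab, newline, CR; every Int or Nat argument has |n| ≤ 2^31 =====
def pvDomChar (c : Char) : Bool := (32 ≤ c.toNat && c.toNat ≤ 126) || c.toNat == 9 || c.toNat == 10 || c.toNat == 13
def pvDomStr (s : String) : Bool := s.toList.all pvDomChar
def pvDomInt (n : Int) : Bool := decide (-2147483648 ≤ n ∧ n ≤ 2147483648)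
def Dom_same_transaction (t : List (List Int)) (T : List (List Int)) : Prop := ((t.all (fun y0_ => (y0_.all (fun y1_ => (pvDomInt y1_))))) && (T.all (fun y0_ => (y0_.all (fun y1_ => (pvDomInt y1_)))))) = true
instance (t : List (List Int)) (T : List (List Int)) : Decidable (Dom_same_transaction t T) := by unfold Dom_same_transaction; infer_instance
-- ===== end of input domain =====

-- B fuses A's remove-all loop and separate length-summing pass into one pass over T
-- consuming a 'needed' copy of t; objective: simpler (no deepcopy, no exception flow).

-- ===== PORT A =====
-- get_length: sum of len(x) over the sequence
def pvGetLength (sequence : List (List Int)) : Int :=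
  sequence.foldl (fun acc x => acc + (x.length : Int)) 0

-- the 'for el in t: temp.remove(el)' loop; none = ValueError
def pvRemoveAll : List (List Int) → List (List Int) → Option (List (List Int))
  | [], temp => some temp
  | el :: rest, temp =>
      match PySem.List.remove? temp el with
      | none => none
      | some temp' => pvRemoveAll rest temp'

def same_transaction (t : List (List Int)) (T : List (List Int)) : Int :=
  match pvRemoveAll t T with
  | some temp => pvGetLength temp
  | none => -1

-- ===== PORT B =====
-- one pass over T: 'if x in needed: needed.remove(x) else: total += len(x)'
-- (remove? is none exactly when x ∉ needed, so it expresses the if/remove pair)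
def pvBLoop : List (List Int) → List (List Int) → Int → List (List Int) × Int
  | [], needed, total => (needed, total)
  | x :: rest, needed, total =>
      match PySem.List.remove? needed x with
      | some needed' => pvBLoop rest needed' total
      | none => pvBLoop rest needed (total + (x.length : Int))

def same_transaction_alt (t : List (List Int)) (T : List (List Int)) : Int :=
  let r := pvBLoop T t 0
  if r.1.isEmpty then r.2 else -1

-- ===== PRECONDITION & SPEC =====
def Spec_same_transaction (t : List (List Int)) (T : List (List Int)) (out : Int) : Prop := out = same_transaction_alt t T
instance (t : List (List Int)) (T : List (List Int)) (out : Int) : Decidable (Spec_same_transaction t T out) := by unfold Spec_same_transaction; infer_instance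

-- ===== CLAIM (what is proved, stated in full; the proofs are below) =====
def Claim_equal_same_transaction : Prop := ∀ (t : List (List Int)) (T : List (List Int)), Dom_same_transaction t T → Spec_same_transaction t T (same_transaction t T)

-- ===== LEMMAS AND PROOFS =====

/-- Sum of (integer) lengths over a multiset of lists. -/
def sumLen (m : Multiset (List Int)) : Int :=
  (m.map (fun x => (x.length : Int))).sum

lemma foldl_len (l : List (List Int)) : ∀ a : Int,
    l.foldl (fun acc x => acc + (x.length : Int)) a
      = a + ((l.map (fun x => (x.length : Int))).sum) := by
  induction l with
  | nil => intro a; simp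
  | cons x xs ih => intro a; simp [List.foldl_cons, ih]; ring

lemma getLength_eq (r : List (List Int)) : pvGetLength r = sumLen (↑r) := by
  simp [pvGetLength, sumLen, foldl_len]

lemma sumLen_cons (x : List Int) (m : Multiset (List Int)) :
    sumLen (x ::ₘ m) = (x.length : Int) + sumLen m := by
  simp [sumLen]

/-- The two lawful `BEq` instances on `List Int` produce the same `List.erase`
(PySem's erase uses the derived instance, Mathlib's coercion lemmas the
`DecidableEq`-derived one). -/
lemma erase_beq_eq (l : List (List Int)) (a : List Int) :
    @List.erase (List Int) List.instBEq l a
      = @List.erase (List Int) instBEqOfDecidableEq l a := by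
  induction l with
  | nil => rfl
  | cons x xs ih =>
      by_cases h : x = a
      · simp [h]
      · simp only [List.erase_cons]
        rw [if_neg (by simpa using h), if_neg (by simpa using h), ih]

lemma coe_erase_pysem (l : List (List Int)) (a : List Int) :
    ((@List.erase (List Int) List.instBEq l a : List (List Int)) : Multiset (List Int))
      = (↑l : Multiset (List Int)).erase a := by
  rw [erase_beq_eq]
  exact (Multiset.coe_erase _ _).symm

/-- Characterisation of A's removal loop through multisets. -/
lemma removeAll_spec : ∀ (t temp : List (List Int)),
    (pvRemoveAll t temp = none ↔ ¬ (↑t : Multiset (List Int)) ≤ ↑temp) ∧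
    (∀ r, pvRemoveAll t temp = some r → (↑r : Multiset (List Int)) = ↑temp - ↑t) := by
  intro t
  induction t with
  | nil =>
      intro temp
      refine ⟨by simp [pvRemoveAll], ?_⟩
      intro r h
      simp [pvRemoveAll] at h
      subst h; simp
  | cons el rest ih =>
      intro temp
      by_cases hmem : el ∈ temp
      · have hrem := PySem.List.remove?_eq_some_erase (v := el) (xs := temp) hmem
        have hcoe := coe_erase_pysem temp el
        have hcons : (el ::ₘ (↑(temp.erase el) : Multiset (List Int))) = ↑temp := by
          rw [hcoe]; exact Multiset.cons_erase (by simpa using hmem)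
        have hstep : pvRemoveAll (el :: rest) temp = pvRemoveAll rest (temp.erase el) := by
          simp [pvRemoveAll, hrem]
        constructor
        · rw [hstep, (ih (temp.erase el)).1]
          constructor
          · intro h hle
            apply h
            have hc2 : (el ::ₘ (↑rest : Multiset (List Int))) ≤ el ::ₘ ↑(temp.erase el) := by
              rw [hcons]; simpa using hle
            exact (Multiset.cons_le_cons_iff el).1 hc2
          · intro h hle
            apply h
            rw [show ((el :: rest : List (List Int)) : Multiset (List Int)) = el ::ₘ ↑rest by simp, ← hcons]
            exact Multiset.cons_le_cons el hle
        · intro r h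
          rw [hstep] at h
          have hr := (ih (temp.erase el)).2 r h
          rw [hr, hcoe,
              show ((el :: rest : List (List Int)) : Multiset (List Int)) = el ::ₘ ↑rest by simp,
              Multiset.sub_cons]
      · have hnone : PySem.List.remove? temp el = none :=
          (PySem.List.remove?_eq_none_iff _ _).2 hmem
        have hstep : pvRemoveAll (el :: rest) temp = none := by simp [pvRemoveAll, hnone]
        constructor
        · rw [hstep]
          simp only [true_iff]
          intro hle
          apply hmem
          have h1 : el ∈ (↑temp : Multiset (List Int)) :=
            Multiset.mem_of_le hle (by simp)
          simpa using h1
        · intro r h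
          rw [hstep] at h
          exact absurd h (by simp)

/-- Invariant of B's single pass. -/
lemma bLoop_spec : ∀ (T needed : List (List Int)) (total : Int),
    ((pvBLoop T needed total).1 : Multiset (List Int)) = ↑needed - ↑T ∧
    (pvBLoop T needed total).2 = total + sumLen ((↑T : Multiset (List Int)) - ↑needed) := by
  intro T
  induction T with
  | nil => intro needed total; simp [pvBLoop, sumLen]
  | cons x rest ih =>
      intro needed total
      by_cases hmem : x ∈ needed
      · have hrem := PySem.List.remove?_eq_some_erase (v := x) (xs := needed) hmem
        have hstep : pvBLoop (x :: rest) needed total = pvBLoop rest (needed.erase x) total := by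
          simp [pvBLoop, hrem]
        have hcoe := coe_erase_pysem needed x
        have hc : 1 ≤ Multiset.count x (↑needed : Multiset (List Int)) :=
          Multiset.count_pos.2 (by simpa using hmem)
        have hsub : ((x :: rest : List (List Int)) : Multiset (List Int)) - ↑needed
            = ↑rest - ↑(needed.erase x) := by
          ext y
          rw [hcoe]
          simp only [Multiset.count_sub,
            show ((x :: rest : List (List Int)) : Multiset (List Int)) = x ::ₘ ↑rest by simp,
            Multiset.count_cons]
          by_cases hy : y = x
          · subst hy
            rw [Multiset.count_erase_self]
            simp only [if_true]
            omega
          · rw [Multiset.count_erase_of_ne hy]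
            simp [hy]
        obtain ⟨ih1, ih2⟩ := ih (needed.erase x) total
        rw [hstep]
        refine ⟨?_, by rw [ih2, hsub]⟩
        rw [ih1, hcoe,
          show ((x :: rest : List (List Int)) : Multiset (List Int)) = x ::ₘ ↑rest by simp,
          Multiset.sub_cons]
      · have hnone : PySem.List.remove? needed x = none :=
          (PySem.List.remove?_eq_none_iff _ _).2 hmem
        have hstep : pvBLoop (x :: rest) needed total
            = pvBLoop rest needed (total + (x.length : Int)) := by
          simp [pvBLoop, hnone]
        have hcount : Multiset.count x (↑needed : Multiset (List Int)) = 0 :=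
          Multiset.count_eq_zero.2 (by simpa using hmem)
        have hsub : ((x :: rest : List (List Int)) : Multiset (List Int)) - ↑needed
            = x ::ₘ ((↑rest : Multiset (List Int)) - ↑needed) := by
          ext y
          simp only [Multiset.count_sub,
            show ((x :: rest : List (List Int)) : Multiset (List Int)) = x ::ₘ ↑rest by simp,
            Multiset.count_cons]
          by_cases hy : y = x
          · subst hy
            simp only [if_true]
            omega
          · simp [hy]
        obtain ⟨ih1, ih2⟩ := ih needed (total + (x.length : Int))
        rw [hstep]
        constructor
        · rw [ih1,
            show ((x :: rest : List (List Int)) : Multiset (List Int)) = x ::ₘ ↑rest by simp,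
            Multiset.sub_cons, ← coe_erase_pysem, List.erase_of_not_mem hmem]
        · rw [ih2, hsub, sumLen_cons]; ring

-- ===== VERDICT (by name: the statement is the Claim_ definition above) =====
theorem same_transaction_spec : Claim_equal_same_transaction := by
  intro t T _
  unfold Spec_same_transaction
  obtain ⟨hb1, hb2⟩ := bLoop_spec T t 0
  cases hA : pvRemoveAll t T with
  | none =>
      have hnle := (removeAll_spec t T).1.1 hA
      have hne : (pvBLoop T t 0).1 ≠ [] := by
        intro h
        apply hnle
        have h0 : ((↑t : Multiset (List Int)) - ↑T) = 0 := by
          rw [← hb1, h]; simp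
        exact tsub_eq_zero_iff_le.1 h0
      have hBval : same_transaction_alt t T = -1 := by
        simp [same_transaction_alt, List.isEmpty_iff, hne]
      have hAval : same_transaction t T = -1 := by
        simp [same_transaction, hA]
      rw [hAval, hBval]
  | some r =>
      have hEq := (removeAll_spec t T).2 r hA
      have hle : (↑t : Multiset (List Int)) ≤ ↑T := by
        by_contra hnle
        exact absurd hA (by simp [(removeAll_spec t T).1.2 hnle])
      have hnil : (pvBLoop T t 0).1 = [] := by
        have h0 : ((pvBLoop T t 0).1 : Multiset (List Int)) = 0 := by
          rw [hb1]; exact tsub_eq_zero_iff_le.2 hle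
        simpa using h0
      have hBval : same_transaction_alt t T = sumLen ((↑T : Multiset (List Int)) - ↑t) := by
        simp [same_transaction_alt, hnil, hb2]
      have hAval : same_transaction t T = pvGetLength r := by
        simp [same_transaction, hA]
      rw [hAval, hBval, getLength_eq, hEq]
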